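-- pv_equiv track=rewrite | github.com/Shahid-Mohammed-Shaikbepari/Data-structures-and-algorithms | LeetCode/interviewing.py | leastUniqueNum
-- ===== SOURCE A (Python) =====
-- import heapq, collections
--
-- def leastUniqueNum(arr, k):
--     if len(arr) < 1:
--         return 0
--     count = collections.Counter(arr)
--     heap = []
--     for e in count.keys():
--         heapq.heappush(heap, (count.get(e), e))
--     while k > 0:
--         freq, e = heapq.heappop(heap)
--         if freq <= k:
--             k -= freq
--             del count[e]
--         else:
--             break
--     return len(count)
-- ===== SOURCE B (Python) =====
-- def leastUniqueNum(arr, k):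
--     # Counting-sort over frequency values (all in 1..n): no heap, no comparison sort.
--     n = len(arr)
--     if n == 0:
--         return 0
--     freq = {}
--     for x in arr:
--         freq[x] = freq.get(x, 0) + 1
--     bucket = [0] * (n + 1)          # bucket[f] = number of distinct values occurring exactly f times
--     for f in freq.values():
--         bucket[f] += 1
--     distinct = len(freq)
--     for f in range(1, n + 1):
--         if f > k:
--             break
--         m = min(bucket[f], k // f)  # how many distinct values of frequency f we can still remove
--         k -= m * f
--         distinct -= m
--     return distinct
-- ===== Notes on version B (the rewrite author's own statement) =====
-- stated objective: faster
-- what changed: Replaces the heap of (frequency, value) tuples with a counting-sort bucket array over frequency values (all in 1..n) and, per frequency, removes min(bucket[f], k//f) distinct values in one arithmetic step instead of popping them one by one.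
-- outside the precondition, e.g. on leastUniqueNum([1], 2): A raises IndexError, B returns 0
import Mathlib
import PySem

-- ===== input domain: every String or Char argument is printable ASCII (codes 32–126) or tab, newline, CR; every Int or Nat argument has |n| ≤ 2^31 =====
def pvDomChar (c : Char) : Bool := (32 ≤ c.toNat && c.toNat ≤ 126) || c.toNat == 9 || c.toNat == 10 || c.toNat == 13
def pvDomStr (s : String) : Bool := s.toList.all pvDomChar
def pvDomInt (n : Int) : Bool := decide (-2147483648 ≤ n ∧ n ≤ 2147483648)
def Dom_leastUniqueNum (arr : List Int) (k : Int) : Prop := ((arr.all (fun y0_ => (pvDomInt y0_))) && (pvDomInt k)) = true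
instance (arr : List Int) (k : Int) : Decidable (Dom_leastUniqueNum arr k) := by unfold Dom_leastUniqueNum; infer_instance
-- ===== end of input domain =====

-- B replaces A's heap of (frequency, value) tuples by a counting-sort bucket over
-- frequency values with a closed-form per-frequency removal count (objective: faster).


-- ===== PORT A =====
-- The heap is modeled as a plain list of (freq, elem) pairs: heappush adds a pair and
-- heappop removes the tuple-lexicographic minimum, which is exactly what this heapq
-- usage (pushes first, then pops) observes.  The lemmas before heapLoopA only justify
-- its termination (the popped minimum is a member, so erasing it shrinks the heap).

def pvStep (acc : Option (Int × Int)) (x : Int × Int) : Option (Int × Int) :=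
  match acc with
  | none => some x
  | some m =>
    if (decide (x.1 < m.1) || !decide (m.1 < x.1) && decide (x.2 < m.2)) = true then some x else some m

theorem pvMin2_eq_foldl (xs : List (Int × Int)) :
    PySem.List.min2? xs Prod.fst Prod.snd = xs.foldl pvStep none := by
  unfold PySem.List.min2?
  congr 1
  funext acc x
  cases acc with
  | none => rfl
  | some b =>
    show _ = pvStep (some b) x
    unfold pvStep
    congr 1

theorem pvMin2_aux (xs : List (Int × Int)) : ∀ (b m : Int × Int),
    List.foldl pvStep (some b) xs = some m →
    (m = b ∨ m ∈ xs) ∧ m.1 ≤ b.1 ∧ ∀ p ∈ xs, m.1 ≤ p.1 := by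
  induction xs with
  | nil => intro b m h; simp at h; subst h; simp
  | cons x xs ih =>
    intro b m h
    simp only [List.foldl_cons] at h
    by_cases hc : (decide (x.1 < b.1) || !decide (b.1 < x.1) && decide (x.2 < b.2)) = true
    · simp only [pvStep, hc, if_true] at h
      obtain ⟨hm, hle, hall⟩ := ih x m h
      have hxb : x.1 ≤ b.1 := by simp at hc; omega
      refine ⟨?_, le_trans hle hxb, ?_⟩
      · rcases hm with h1 | h1
        · exact Or.inr (by simp [h1])
        · exact Or.inr (by simp [h1])
      · intro p hp
        rcases List.mem_cons.mp hp with h1 | h1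
        · subst h1; exact hle
        · exact hall p h1
    · simp only [pvStep, hc] at h
      obtain ⟨hm, hle, hall⟩ := ih b m h
      have hbx : b.1 ≤ x.1 := by simp at hc; omega
      refine ⟨?_, hle, ?_⟩
      · rcases hm with h1 | h1
        · exact Or.inl h1
        · exact Or.inr (by simp [h1])
      · intro p hp
        rcases List.mem_cons.mp hp with h1 | h1
        · subst h1; exact le_trans hle hbx
        · exact hall p h1

theorem pvMin2_mem_fst (xs : List (Int × Int)) (m : Int × Int)
    (h : PySem.List.min2? xs Prod.fst Prod.snd = some m) :
    m ∈ xs ∧ ∀ p ∈ xs, m.1 ≤ p.1 := by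
  cases xs with
  | nil => simp [PySem.List.min2?] at h
  | cons x xs =>
    rw [pvMin2_eq_foldl, List.foldl_cons] at h
    obtain ⟨hm, hle, hall⟩ := pvMin2_aux xs x m h
    refine ⟨?_, ?_⟩
    · rcases hm with h1 | h1
      · simp [h1]
      · exact List.mem_cons_of_mem _ h1
    · intro p hp
      rcases List.mem_cons.mp hp with h1 | h1
      · subst h1; exact hle
      · exact hall p h1

def heapLoopA (k : Int) (count : PySem.Dict Int Int) (heap : List (Int × Int)) : Int :=
  if k > 0 then
    match hm : PySem.List.min2? heap Prod.fst Prod.snd with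
    | none => (count.size : Int)      -- empty heap with k > 0: Python raises IndexError here (outside Pre_)
    | some m =>
      if m.1 ≤ k then heapLoopA (k - m.1) (count.erase m.2) (heap.erase m)
      else (count.size : Int)
  else (count.size : Int)
termination_by heap.length
decreasing_by
  have hmem := (pvMin2_mem_fst _ _ hm).1
  have h1 := List.length_erase_of_mem hmem
  have h2 := List.length_pos_of_mem hmem
  omega

def leastUniqueNum (arr : List Int) (k : Int) : Int :=
  if arr.length < 1 then 0
  else
    let count := PySem.Dict.counter arr
    let heap := count.keys.foldl (fun h e => (count.getD e 0, e) :: h) ([] : List (Int × Int))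
    heapLoopA k count heap

-- ===== PORT B =====
def altLoop (bucket : List Int) (k d : Int) : List Int → Int
  | [] => d
  | f :: fs =>
    if f > k then d                    -- break
    else
      let m := min (bucket.getD f.toNat 0) (PySem.Int.floordiv k f)
      altLoop bucket (k - m * f) (d - m) fs

def leastUniqueNum_alt (arr : List Int) (k : Int) : Int :=
  let n := arr.length
  if n == 0 then 0
  else
    let freq := arr.foldl (fun d x => d.insert x (d.getD x 0 + 1)) (PySem.Dict.empty : PySem.Dict Int Int)
    -- bucket[f] += 1: the index f is a dict value, always 1 ≤ f ≤ n, so .toNat indexing is exact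
    let bucket := freq.values.foldl (fun b f => b.set f.toNat (b.getD f.toNat 0 + 1)) (List.replicate (n + 1) 0)
    altLoop bucket k (freq.size : Int) (PySem.List.pyRange 1 ((n : Int) + 1))

-- ===== PRECONDITION & SPEC =====
-- Pre_ excludes exactly the inputs on which Python A raises IndexError
-- (non-empty arr with k > len(arr): the heap is exhausted while k is still positive).
def Pre_leastUniqueNum (arr : List Int) (k : Int) : Prop := arr = [] ∨ k ≤ arr.length
instance (arr : List Int) (k : Int) : Decidable (Pre_leastUniqueNum arr k) := by unfold Pre_leastUniqueNum; infer_instance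
def pvWitness_leastUniqueNum : List Int × Int := ([1, 1, 2], 2)

def Spec_leastUniqueNum (arr : List Int) (k : Int) (out : Int) : Prop := out = leastUniqueNum_alt arr k
instance (arr : List Int) (k : Int) (out : Int) : Decidable (Spec_leastUniqueNum arr k out) := by unfold Spec_leastUniqueNum; infer_instance

-- ===== CLAIM (what is proved, stated in full; the proofs are below) =====
def Claim_equal_leastUniqueNum : Prop := ∀ (arr : List Int) (k : Int), Dom_leastUniqueNum arr k → Pre_leastUniqueNum arr k → Spec_leastUniqueNum arr k (leastUniqueNum arr k)

-- ===== LEMMAS AND PROOFS =====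

-- the common spec both loops meet: greedy removal along an ascending frequency list,
-- stopping at the first frequency that exceeds the remaining budget
def greedy (k : Int) : List Int → Int
  | [] => 0
  | f :: fs => if f ≤ k then greedy (k - f) fs + 1 else 0

theorem greedy_all_gt (k : Int) (l : List Int) (h : ∀ x ∈ l, k < x) : greedy k l = 0 := by
  cases l with
  | nil => rfl
  | cons f fs =>
    have := h f (by simp)
    simp [greedy, not_le.mpr this]

theorem greedy_replicate_append (c : Nat) (f k : Int) (L : List Int)
    (hf : 1 ≤ f) (h : (c : Int) * f ≤ k) :
    greedy k (List.replicate c f ++ L) = c + greedy (k - c * f) L := by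
  induction c generalizing k with
  | zero => simp
  | succ c ih =>
    have hfk : f ≤ k := by push_cast at h ⊢; nlinarith
    have h' : (c : Int) * f ≤ k - f := by push_cast at h ⊢; nlinarith
    simp only [List.replicate_succ, List.cons_append, greedy, if_pos hfk, ih (k - f) h']
    rw [show k - f - (c : Int) * f = k - ((c : Int) + 1) * f from by ring]
    push_cast; ring

-- ----- Dict facts about erase (unfolded from the transparent definitions) -----

theorem pv_len_filter_key : ∀ (l : List (Int × Int)) (e : Int),
    (l.filter (fun p => p.1 == e)).length = (l.map Prod.fst).count e := by
  intro l e
  induction l with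
  | nil => rfl
  | cons p l ih =>
    by_cases h : p.1 = e
    · simp [List.filter_cons, List.count_cons, h, ih]
    · simp [List.filter_cons, List.count_cons, h, Ne.symm h, ih]

theorem pv_size_erase (d : PySem.Dict Int Int) (e : Int) (hk : d.keys.Nodup) (he : e ∈ d.keys) :
    (d.erase e).size = d.size - 1 ∧ 1 ≤ d.size := by
  have h1 : d.items.length = (d.items.filter (fun p => p.1 == e)).length + (d.items.filter (fun p => !(p.1 == e))).length :=
    List.length_eq_length_filter_add _
  have h2 : (d.items.filter (fun p => p.1 == e)).length = 1 := by
    rw [pv_len_filter_key]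
    exact List.count_eq_one_of_mem hk he
  constructor
  · simp only [PySem.Dict.erase, PySem.Dict.size]
    omega
  · simp only [PySem.Dict.size]; omega

theorem pv_mem_keys_erase (d : PySem.Dict Int Int) (e x : Int) (hx : x ∈ d.keys) (hne : x ≠ e) :
    x ∈ (d.erase e).keys := by
  simp only [PySem.Dict.keys, PySem.Dict.erase, List.mem_map] at hx ⊢
  obtain ⟨p, hp, hpx⟩ := hx
  exact ⟨p, List.mem_filter.mpr ⟨hp, by simp [hpx, hne]⟩, hpx⟩

theorem pv_nodup_keys_erase (d : PySem.Dict Int Int) (e : Int) (hk : d.keys.Nodup) :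
    (d.erase e).keys.Nodup := by
  simp only [PySem.Dict.keys, PySem.Dict.erase] at *
  exact List.Nodup.sublist (List.Sublist.map _ List.filter_sublist) hk

theorem pv_foldl_cons_rev {α β : Type} (l : List α) (g : α → β) :
    ∀ acc : List β, l.foldl (fun h e => g e :: h) acc = (l.map g).reverse ++ acc := by
  induction l with
  | nil => intro acc; simp
  | cons x xs ih => intro acc; simp [ih, List.map_cons]

-- ----- A side: the extract-min loop computes greedy removal on the sorted frequency list -----

theorem pvMin2_step_some (xs : List (Int × Int)) (b : Int × Int) :
    ∃ m, List.foldl pvStep (some b) xs = some m := by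
  induction xs generalizing b with
  | nil => exact ⟨b, rfl⟩
  | cons x xs ih =>
    simp only [List.foldl_cons]
    by_cases hc : (decide (x.1 < b.1) || !decide (b.1 < x.1) && decide (x.2 < b.2)) = true
    · simpa [pvStep, hc] using ih x
    · simpa [pvStep, hc] using ih b

theorem pvMin2_none (xs : List (Int × Int))
    (h : PySem.List.min2? xs Prod.fst Prod.snd = none) : xs = [] := by
  cases xs with
  | nil => rfl
  | cons x xs =>
    rw [pvMin2_eq_foldl, List.foldl_cons] at h
    obtain ⟨m, hm⟩ := pvMin2_step_some xs x
    rw [show List.foldl pvStep (pvStep none x) xs = List.foldl pvStep (some x) xs from rfl, hm] at h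
    exact absurd h (by simp)

theorem pv_sorted_cons_min (heap : List (Int × Int)) (m : Int × Int) (hm : m ∈ heap)
    (hmin : ∀ p ∈ heap, m.1 ≤ p.1) :
    PySem.List.sorted (heap.map Prod.fst) (fun x => x) false
      = m.1 :: PySem.List.sorted ((heap.erase m).map Prod.fst) (fun x => x) false := by
  apply PySem.List.sorted_id_eq_of_perm_of_pairwise
  · have h1 : (PySem.List.sorted ((heap.erase m).map Prod.fst) (fun x => x) false).Perm
        ((heap.erase m).map Prod.fst) := PySem.List.sorted_perm _ _ _
    have h2 : (heap.map Prod.fst).Perm (m.1 :: (heap.erase m).map Prod.fst) := by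
      simpa using (List.perm_cons_erase hm).map Prod.fst
    exact (h1.cons m.1).trans h2.symm
  · refine List.pairwise_cons.mpr ⟨?_, ?_⟩
    · intro y hy
      rw [PySem.List.mem_sorted] at hy
      obtain ⟨p, hp, rfl⟩ := List.mem_map.mp hy
      exact hmin p (List.mem_of_mem_erase hp)
    · exact PySem.List.sorted_pairwise _ _

theorem heapA_eq : ∀ (N : Nat) (heap : List (Int × Int)), heap.length ≤ N →
    ∀ (k : Int) (count : PySem.Dict Int Int),
    (heap.map Prod.snd).Nodup → (∀ p ∈ heap, p.2 ∈ count.keys) → count.keys.Nodup →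
    (∀ p ∈ heap, 1 ≤ p.1) →
    heapLoopA k count heap
      = (count.size : Int) - greedy k (PySem.List.sorted (heap.map Prod.fst) (fun x => x) false) := by
  intro N
  induction N with
  | zero =>
    intro heap hlen k count _ _ _ _
    have hnil : heap = [] := List.eq_nil_of_length_eq_zero (by omega)
    subst hnil
    rw [heapLoopA]
    simp [PySem.List.min2?, greedy,
      show PySem.List.sorted ([] : List Int) (fun x => x) false = [] from rfl]
  | succ N ih =>
    intro heap hlen k count hnd hmem hkn hpos
    rw [heapLoopA]
    by_cases hk : k > 0
    · simp only [if_pos hk]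
      cases hmin : PySem.List.min2? heap Prod.fst Prod.snd with
      | none =>
        have hnil := pvMin2_none _ hmin
        subst hnil
        simp [greedy, show PySem.List.sorted ([] : List Int) (fun x => x) false = [] from rfl]
      | some m =>
        obtain ⟨hmm, hminf⟩ := pvMin2_mem_fst heap m hmin
        rw [pv_sorted_cons_min heap m hmm hminf]
        by_cases hmk : m.1 ≤ k
        · simp only [if_pos hmk]
          have hheapnd : heap.Nodup := hnd.of_map
          have hlen' : (heap.erase m).length ≤ N := by
            have h1 := List.length_erase_of_mem hmm
            have h2 := List.length_pos_of_mem hmm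
            omega
          have hnd' : ((heap.erase m).map Prod.snd).Nodup :=
            List.Nodup.sublist (List.Sublist.map _ List.erase_sublist) hnd
          have hm2 : m.2 ∈ count.keys := hmem m hmm
          have hmem' : ∀ p ∈ heap.erase m, p.2 ∈ (count.erase m.2).keys := by
            intro p hp
            have hpheap := List.mem_of_mem_erase hp
            have hpm : p ≠ m := ((List.Nodup.mem_erase_iff hheapnd).mp hp).1
            have hps : p.2 ≠ m.2 := fun hEq => hpm (List.inj_on_of_nodup_map hnd hpheap hmm hEq)
            exact pv_mem_keys_erase _ _ _ (hmem p hpheap) hps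
          have hkn' := pv_nodup_keys_erase count m.2 hkn
          have hpos' : ∀ p ∈ heap.erase m, 1 ≤ p.1 := fun p hp => hpos p (List.mem_of_mem_erase hp)
          rw [ih (heap.erase m) hlen' (k - m.1) (count.erase m.2) hnd' hmem' hkn' hpos']
          obtain ⟨hsz, hsz1⟩ := pv_size_erase count m.2 hkn hm2
          rw [hsz]
          have hcast : ((count.size - 1 : Nat) : Int) = (count.size : Int) - 1 := by omega
          rw [hcast]
          simp only [greedy, if_pos hmk]
          ring
        · simp only [if_neg hmk]
          simp [greedy, hmk]
    · simp only [if_neg hk]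
      have h0 : greedy k (PySem.List.sorted (heap.map Prod.fst) (fun x => x) false) = 0 := by
        apply greedy_all_gt
        intro x hx
        rw [PySem.List.mem_sorted] at hx
        obtain ⟨p, hp, rfl⟩ := List.mem_map.mp hx
        have := hpos p hp; omega
      rw [h0]; ring

-- ----- B side: the bucket loop computes greedy removal on the same sorted list -----

theorem altLoop_break (bucket : List Int) (k d : Int) (fs : List Int)
    (h : ∀ g ∈ fs, k < g) : altLoop bucket k d fs = d := by
  cases fs with
  | nil => rfl
  | cons g gs => simp [altLoop, h g (by simp)]

theorem pv_flat_mem (fs : List Int) (c : Int → Nat) (y : Int)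
    (hy : y ∈ fs.flatMap (fun g => List.replicate (c g) g)) : y ∈ fs := by
  obtain ⟨g, hg, hyg⟩ := List.mem_flatMap.mp hy
  rwa [List.eq_of_mem_replicate hyg]

theorem altLoop_eq (vs bucket : List Int) : ∀ (r : List Int), r.Pairwise (· < ·) → (∀ f ∈ r, 1 ≤ f) →
    (∀ f ∈ r, bucket.getD f.toNat 0 = (vs.count f : Int)) →
    ∀ k d, altLoop bucket k d r = d - greedy k (r.flatMap (fun f => List.replicate (vs.count f) f)) := by
  intro r
  induction r with
  | nil => intro _ _ _ k d; simp [altLoop, greedy]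
  | cons f fs ih =>
    intro hr h1 hB k d
    have hfs := (List.pairwise_cons.mp hr).1
    have hr' := (List.pairwise_cons.mp hr).2
    have h1f : (1:Int) ≤ f := h1 f (by simp)
    by_cases hfk : f > k
    · rw [show altLoop bucket k d (f :: fs) = d from by simp [altLoop, hfk]]
      have h0 : greedy k ((f::fs).flatMap (fun g => List.replicate (vs.count g) g)) = 0 := by
        apply greedy_all_gt
        intro x hx
        rcases List.mem_cons.mp (pv_flat_mem _ _ _ hx) with rfl | hxf
        · omega
        · have := hfs x hxf; omega
      rw [h0]; ring
    · have hf0 : (0:Int) < f := by omega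
      have hqf : PySem.Int.floordiv k f * f ≤ k := (PySem.Int.le_floordiv_iff_mul_le hf0).mp (le_refl _)
      have hkq : k < (PySem.Int.floordiv k f + 1) * f := (PySem.Int.floordiv_lt_iff_lt_mul hf0).mp (by omega)
      have hq0 : 0 ≤ PySem.Int.floordiv k f := (PySem.Int.le_floordiv_iff_mul_le hf0).mpr (by omega)
      have hrem : k - PySem.Int.floordiv k f * f < f := by rw [add_mul, one_mul] at hkq; omega
      have hB' : bucket.getD f.toNat 0 = (vs.count f : Int) := hB f (by simp)
      have hstep : altLoop bucket k d (f :: fs)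
          = altLoop bucket (k - min ((vs.count f : Int)) (PySem.Int.floordiv k f) * f)
                    (d - min ((vs.count f : Int)) (PySem.Int.floordiv k f)) fs := by
        simp only [altLoop, if_neg hfk, hB']
      rw [hstep, List.flatMap_cons]
      by_cases hcq : ((vs.count f : Int)) ≤ PySem.Int.floordiv k f
      · rw [min_eq_left hcq]
        rw [ih hr' (fun g hg => h1 g (by simp [hg])) (fun g hg => hB g (by simp [hg])) _ _]
        rw [greedy_replicate_append (vs.count f) f k _ h1f (by nlinarith)]
        ring
      · have hqc : PySem.Int.floordiv k f < ((vs.count f : Int)) := by omega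
        rw [min_eq_right (by omega)]
        rw [altLoop_break bucket _ _ fs (by intro g hg; have := hfs g hg; omega)]
        have hsplit : List.replicate (vs.count f) f
            = List.replicate (PySem.Int.floordiv k f).toNat f ++ List.replicate (vs.count f - (PySem.Int.floordiv k f).toNat) f := by
          rw [← List.replicate_add]; congr 1; omega
        rw [hsplit, List.append_assoc]
        rw [greedy_replicate_append (PySem.Int.floordiv k f).toNat f k _ h1f
          (by rw [Int.toNat_of_nonneg hq0]; exact hqf)]
        have h0 : greedy (k - ((PySem.Int.floordiv k f).toNat : Int) * f)
            (List.replicate (vs.count f - (PySem.Int.floordiv k f).toNat) f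
              ++ fs.flatMap (fun g => List.replicate (vs.count g) g)) = 0 := by
          apply greedy_all_gt
          intro x hx
          rw [Int.toNat_of_nonneg hq0]
          rcases List.mem_append.mp hx with hx1 | hx2
          · rw [List.eq_of_mem_replicate hx1]; omega
          · have := hfs x (pv_flat_mem _ _ _ hx2); omega
        rw [h0, Int.toNat_of_nonneg hq0]; ring

theorem pv_perm_flatMap : ∀ (r : List Int), r.Nodup → ∀ (vs : List Int), (∀ v ∈ vs, v ∈ r) →
    (r.flatMap (fun f => List.replicate (vs.count f) f)).Perm vs := by
  intro r
  induction r with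
  | nil =>
    intro _ vs hsub
    have : vs = [] := List.eq_nil_iff_forall_not_mem.mpr (fun x hx => by simpa using hsub x hx)
    simp [this]
  | cons f fs ih =>
    intro hnd vs hsub
    have hf : f ∉ fs := (List.nodup_cons.mp hnd).1
    have hnd' := (List.nodup_cons.mp hnd).2
    rw [List.flatMap_cons]
    have h1 : List.replicate (vs.count f) f = vs.filter (· == f) := (List.filter_beq f).symm
    have h2 : fs.flatMap (fun g => List.replicate (vs.count g) g)
        = fs.flatMap (fun g => List.replicate ((vs.filter (fun v => !(v == f))).count g) g) := by
      rw [List.flatMap_def, List.flatMap_def]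
      congr 1
      apply List.map_congr_left
      intro g hg
      have hgf : g ≠ f := fun h => hf (h ▸ hg)
      rw [List.count_filter (by simp [hgf])]
    have h3 := ih hnd' (vs.filter (fun v => !(v == f))) (by
      intro v hv
      have hvm := List.mem_of_mem_filter hv
      have hvf : v ≠ f := by simpa using List.of_mem_filter hv
      rcases List.mem_cons.mp (hsub v hvm) with rfl | hvfs
      · exact absurd rfl hvf
      · exact hvfs)
    rw [h1, h2]
    exact (List.Perm.append (List.Perm.refl _) h3).trans (List.filter_append_perm _ vs)

theorem pv_pairwise_flatMap (vs : List Int) : ∀ (r : List Int), r.Pairwise (· < ·) →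
    (r.flatMap (fun f => List.replicate (vs.count f) f)).Pairwise (· ≤ ·) := by
  intro r
  induction r with
  | nil => intro _; simp
  | cons f fs ih =>
    intro hr
    rw [List.flatMap_cons]
    apply List.pairwise_append.mpr
    refine ⟨List.pairwise_replicate_of_refl, ih (List.pairwise_cons.mp hr).2, ?_⟩
    intro x hx y hy
    rw [List.eq_of_mem_replicate hx]
    have := (List.pairwise_cons.mp hr).1 y (pv_flat_mem _ _ _ hy)
    omega

theorem sorted_eq_flatMap (r vs : List Int) (hr : r.Pairwise (· < ·))
    (hsub : ∀ v ∈ vs, v ∈ r) :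
    PySem.List.sorted vs (fun x => x) false
      = r.flatMap (fun f => List.replicate (vs.count f) f) :=
  PySem.List.sorted_id_eq_of_perm_of_pairwise vs _
    (pv_perm_flatMap r (hr.imp (fun h => ne_of_lt h)) vs hsub)
    (pv_pairwise_flatMap vs r hr)

-- ----- bucket characterization -----

theorem pv_bucket_getD (vals : List Int) : ∀ (b : List Int), (∀ v ∈ vals, 0 ≤ v ∧ v.toNat < b.length) →
    ∀ (j : Nat), j < b.length →
    (vals.foldl (fun b f => b.set f.toNat (b.getD f.toNat 0 + 1)) b).getD j 0
      = b.getD j 0 + (vals.count (j : Int) : Int) := by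
  induction vals with
  | nil => intro b _ j _; simp
  | cons v vs ih =>
    intro b hv j hj
    obtain ⟨hv0, hvl⟩ := hv v (by simp)
    have hrest : ∀ w ∈ vs, 0 ≤ w ∧ w.toNat < (b.set v.toNat (b.getD v.toNat 0 + 1)).length := by
      intro w hw; simpa using hv w (by simp [hw])
    rw [List.foldl_cons, ih _ hrest j (by simpa using hj)]
    by_cases hvj : v.toNat = j
    · subst hvj
      have hvj' : v = ((v.toNat : Nat) : Int) := by omega
      rw [List.getD_eq_getElem?_getD, List.getElem?_set_self', List.getElem?_eq_getElem hvl]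
      rw [List.getD_eq_getElem?_getD, List.getElem?_eq_getElem hvl]
      simp [List.count_cons, ← hvj']
      omega
    · have hvj' : ((j:Int)) ≠ v := by omega
      rw [List.getD_eq_getElem?_getD, List.getElem?_set_ne (by omega), ← List.getD_eq_getElem?_getD,
        List.count_cons]
      simp [hvj', Ne.symm hvj']

-- ----- assembly -----

theorem leastUniqueNum_eq_common (arr : List Int) (k : Int) :
    leastUniqueNum arr k = leastUniqueNum_alt arr k := by
  by_cases harr : arr = []
  · subst harr; rfl
  · have hlen : 0 < arr.length := List.length_pos_of_ne_nil harr
    have hkeys : (PySem.Dict.counter arr).keys = PySem.Set.ofList arr := PySem.Dict.keys_counter arr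
    have hknd : (PySem.Dict.counter arr).keys.Nodup := PySem.Dict.nodup_keys_counter arr
    have hmemarr : ∀ e ∈ (PySem.Dict.counter arr).keys, e ∈ arr := by
      intro e he; rw [hkeys] at he; exact (PySem.List.mem_dedup arr e).mp he
    have hvalsmap : (PySem.Dict.counter arr).values
        = (PySem.Dict.counter arr).keys.map (fun e => (PySem.Dict.counter arr).getD e 0) :=
      PySem.Dict.values_eq_map_keys _ hknd 0
    have hvals : ∀ v ∈ (PySem.Dict.counter arr).values, 1 ≤ v ∧ v ≤ (arr.length : Int) := by
      intro v hv
      rw [hvalsmap] at hv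
      obtain ⟨e, he, rfl⟩ := List.mem_map.mp hv
      rw [PySem.Dict.getD_counter]
      have h1 : 0 < arr.count e := List.count_pos_iff.mpr (hmemarr e he)
      have h2 : arr.count e ≤ arr.length := List.count_le_length
      omega
    have hA : leastUniqueNum arr k
        = ((PySem.Dict.counter arr).size : Int)
          - greedy k (PySem.List.sorted (PySem.Dict.counter arr).values (fun x => x) false) := by
      simp only [leastUniqueNum, if_neg (by omega : ¬ arr.length < 1)]
      rw [pv_foldl_cons_rev, List.append_nil]
      rw [heapA_eq (((PySem.Dict.counter arr).keys.map
            (fun e => ((PySem.Dict.counter arr).getD e 0, e))).reverse.length) _ le_rfl k _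
          ?nd ?mem hknd ?pos]
      case nd =>
        rw [List.map_reverse, List.map_map]
        rw [show ((fun p => p.2) ∘ fun e => ((PySem.Dict.counter arr).getD e 0, e)) = fun e => e from rfl]
        rw [List.map_id_fun']
        exact List.nodup_reverse.mpr hknd
      case mem =>
        intro p hp
        rw [List.mem_reverse] at hp
        obtain ⟨e, he, rfl⟩ := List.mem_map.mp hp
        exact he
      case pos =>
        intro p hp
        rw [List.mem_reverse] at hp
        obtain ⟨e, he, rfl⟩ := List.mem_map.mp hp
        show 1 ≤ (PySem.Dict.counter arr).getD e 0
        rw [PySem.Dict.getD_counter]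
        have h1 : 0 < arr.count e := List.count_pos_iff.mpr (hmemarr e he)
        omega
      congr 2
      rw [List.map_reverse, List.map_map]
      rw [show ((fun p => p.1) ∘ fun e => ((PySem.Dict.counter arr).getD e 0, e))
          = fun e => (PySem.Dict.counter arr).getD e 0 from rfl]
      rw [← hvalsmap]
      exact PySem.List.sorted_eq_sorted_of_perm _ _ _ (fun a b h => h) (List.reverse_perm _)
    have hB : leastUniqueNum_alt arr k
        = ((PySem.Dict.counter arr).size : Int)
          - greedy k (PySem.List.sorted (PySem.Dict.counter arr).values (fun x => x) false) := by
      simp only [leastUniqueNum_alt, PySem.Dict.foldl_insert_getD_add_one_eq_counter]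
      rw [if_neg (by simp [harr])]
      have hcond : ∀ v ∈ (PySem.Dict.counter arr).values,
          0 ≤ v ∧ v.toNat < (List.replicate (arr.length + 1) (0:Int)).length := by
        intro v hv
        obtain ⟨h1, h2⟩ := hvals v hv
        constructor
        · omega
        · simp only [List.length_replicate]; omega
      have hBf : ∀ f ∈ PySem.List.pyRange 1 ((arr.length : Int) + 1),
          ((PySem.Dict.counter arr).values.foldl (fun b f => b.set f.toNat (b.getD f.toNat 0 + 1))
            (List.replicate (arr.length + 1) 0)).getD f.toNat 0
          = ((PySem.Dict.counter arr).values.count f : Int) := by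
        intro f hf
        obtain ⟨hf1, hf2⟩ := PySem.List.mem_pyRange_one.mp hf
        rw [pv_bucket_getD _ _ hcond f.toNat (by simp only [List.length_replicate]; omega)]
        rw [Int.toNat_of_nonneg (by omega)]
        simp
      rw [altLoop_eq (PySem.Dict.counter arr).values _ _ (PySem.List.pairwise_lt_pyRange_one _ _)
          (fun f hf => (PySem.List.mem_pyRange_one.mp hf).1) hBf k _]
      rw [sorted_eq_flatMap (PySem.List.pyRange 1 ((arr.length : Int) + 1)) _
          (PySem.List.pairwise_lt_pyRange_one _ _)
          (fun v hv => PySem.List.mem_pyRange_one.mpr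
            ⟨(hvals v hv).1, by have := (hvals v hv).2; omega⟩)]
    rw [hA, hB]

-- ===== VERDICT (by name: the statement is the Claim_ definition above) =====
theorem leastUniqueNum_spec : Claim_equal_leastUniqueNum := by
  intro arr k _ _
  unfold Spec_leastUniqueNum
  exact leastUniqueNum_eq_common arr k
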